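-- pv_equiv track=rewrite | github.com/Mike-Wazowsk1/codeforces_pilot | Z function/step 1/count_good_substring.py | count_good_substring
-- ===== SOURCE A (Python) =====
-- def count_good_substring(s, t):
--     count = 0
--     for i in range(len(s)):
--         for j in range(i, len(s)):
--             if t in s[i:j + 1]:
--                 break
--             else:
--                 count += 1
--     return count
-- ===== SOURCE B (Python) =====
-- def count_good_substring(s, t):
--     n, m = len(s), len(t)
--     if m == 0:
--         return 0
--     count = 0
--     nxt = None  # smallest occurrence start >= current i
--     for i in range(n - 1, -1, -1):
--         if s[i:i + m] == t:
--             nxt = i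
--         if nxt is None:
--             count += n - i
--         else:
--             count += nxt + m - 1 - i
--     return count
-- ===== Notes on version B (the rewrite author's own statement) =====
-- stated objective: faster
-- what changed: Replaces the triple-nested scan (all starts x all ends x substring search) by a single right-to-left pass that tracks the nearest occurrence of t at or after each start and counts the good end positions in O(1) per start.
import Mathlib
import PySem

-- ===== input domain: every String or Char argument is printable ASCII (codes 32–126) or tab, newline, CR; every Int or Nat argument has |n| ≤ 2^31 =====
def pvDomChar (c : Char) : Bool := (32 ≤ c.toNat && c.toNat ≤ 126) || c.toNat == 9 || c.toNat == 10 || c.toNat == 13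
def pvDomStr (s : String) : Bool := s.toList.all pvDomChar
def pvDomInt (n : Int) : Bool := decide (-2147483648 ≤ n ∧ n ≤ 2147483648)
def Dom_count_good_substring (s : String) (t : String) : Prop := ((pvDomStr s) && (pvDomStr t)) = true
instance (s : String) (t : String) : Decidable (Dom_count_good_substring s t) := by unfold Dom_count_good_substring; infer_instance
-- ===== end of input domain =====

-- B replaces A's triple-nested scan by one right-to-left pass tracking the nearest
-- occurrence of t (objective: asymptotically faster).

-- ===== PORT A =====
-- inner loop of A: for j in range(i, len(s)): if t in s[i:j+1]: break else: count += 1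
def pvInnerA (tl sl : List Char) (i : Int) : List Int → Int
  | [] => 0
  | j :: rest =>
    if PySem.Chars.isIn tl (PySem.List.slice sl (some i) (some (j + 1))) then 0
    else 1 + pvInnerA tl sl i rest

def count_good_substring (s : String) (t : String) : Int :=
  let sl := s.toList
  let tl := t.toList
  (PySem.List.pyRange 0 (sl.length : Int) 1).foldl
    (fun count i => count + pvInnerA tl sl i (PySem.List.pyRange i (sl.length : Int) 1)) 0

-- ===== PORT B =====
-- loop of B: for i in range(n-1, -1, -1), carrying nxt = smallest occurrence start ≥ i
def pvLoopB (sl tl : List Char) (m n : Int) : List Int → Option Int → Int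
  | [], _ => 0
  | i :: rest, nxt =>
    let nxt' := if PySem.List.slice sl (some i) (some (i + m)) = tl then some i else nxt
    (match nxt' with
     | none => n - i
     | some p => p + m - 1 - i) + pvLoopB sl tl m n rest nxt'

def count_good_substring_alt (s : String) (t : String) : Int :=
  let sl := s.toList
  let tl := t.toList
  let n : Int := sl.length
  let m : Int := tl.length
  if m = 0 then 0
  else pvLoopB sl tl m n (PySem.List.pyRange (n - 1) (-1) (-1)) none

-- ===== PRECONDITION & SPEC =====
def Spec_count_good_substring (s : String) (t : String) (out : Int) : Prop := out = count_good_substring_alt s t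
instance (s : String) (t : String) (out : Int) : Decidable (Spec_count_good_substring s t out) := by unfold Spec_count_good_substring; infer_instance

-- ===== CLAIM (what is proved, stated in full; the proofs are below) =====
def Claim_equal_count_good_substring : Prop := ∀ (s : String) (t : String), Dom_count_good_substring s t → Spec_count_good_substring s t (count_good_substring s t)

-- ===== LEMMAS AND PROOFS =====

-- first occurrence start of tl in sl at index ≥ i, searched with fuel d
def pvNextAux (sl tl : List Char) : Nat → Nat → Option Nat
  | _, 0 => none
  | i, d + 1 => if tl <+: sl.drop i then some i else pvNextAux sl tl (i + 1) d

def pvNext (sl tl : List Char) (i : Nat) : Option Nat := pvNextAux sl tl i (sl.length - i)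

-- per-start contribution both programs compute
def pvG (sl tl : List Char) (i : Nat) : Int :=
  match pvNext sl tl i with
  | some p => (p : Int) + tl.length - 1 - i
  | none => (sl.length : Int) - i

lemma pvNextAux_some {sl tl : List Char} {i d p : Nat} (h : pvNextAux sl tl i d = some p) :
    i ≤ p ∧ p < i + d ∧ tl <+: sl.drop p ∧ ∀ q, i ≤ q → q < p → ¬ tl <+: sl.drop q := by
  induction d generalizing i with
  | zero => simp [pvNextAux] at h
  | succ d ih =>
    rw [pvNextAux] at h
    by_cases hocc : tl <+: sl.drop i
    · rw [if_pos hocc] at h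
      obtain rfl : i = p := by injection h
      exact ⟨le_refl _, by omega, hocc, fun q h1 h2 _ => by omega⟩
    · rw [if_neg hocc] at h
      obtain ⟨h1, h2, h3, h4⟩ := ih h
      refine ⟨by omega, by omega, h3, fun q hq1 hq2 => ?_⟩
      rcases Nat.eq_or_lt_of_le hq1 with rfl | hlt
      · exact hocc
      · exact h4 q hlt hq2

lemma pvNextAux_none {sl tl : List Char} {i d : Nat} (h : pvNextAux sl tl i d = none) :
    ∀ q, i ≤ q → q < i + d → ¬ tl <+: sl.drop q := by
  induction d generalizing i with
  | zero => intro q h1 h2; omega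
  | succ d ih =>
    rw [pvNextAux] at h
    by_cases hocc : tl <+: sl.drop i
    · rw [if_pos hocc] at h; exact absurd h (by simp)
    · rw [if_neg hocc] at h
      intro q hq1 hq2
      rcases Nat.eq_or_lt_of_le hq1 with rfl | hlt
      · exact hocc
      · exact ih h q hlt (by omega)

-- "t in s[i:j+1]" ⟺ some occurrence of t starts in [i, j+1-|t|]
lemma pv_isIn_slice_iff (sl tl : List Char) (ht : tl ≠ []) (i j : Nat) :
    PySem.Chars.isIn tl (PySem.List.slice sl (some (i : Int)) (some ((j : Int) + 1))) = true ↔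
      ∃ p, i ≤ p ∧ p + tl.length ≤ j + 1 ∧ tl <+: sl.drop p := by
  have hm : 0 < tl.length := List.length_pos_of_ne_nil ht
  have h1 : ((j : Int) + 1) = (((j + 1 : Nat)) : Int) := by push_cast; ring
  rw [h1, PySem.List.slice_natCast, ← PySem.Chars.exists_prefix_drop_iff_isIn]
  constructor
  · rintro ⟨k, hk⟩
    rw [List.drop_take, List.drop_drop, List.prefix_take_iff] at hk
    obtain ⟨hpre, hlen⟩ := hk
    exact ⟨i + k, by omega, by omega, hpre⟩
  · rintro ⟨p, hip, hpm, hpre⟩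
    refine ⟨p - i, ?_⟩
    rw [List.drop_take, List.drop_drop, List.prefix_take_iff]
    constructor
    · rw [show i + (p - i) = p from by omega]; exact hpre
    · omega

-- A's inner loop counts up to a threshold B: first j with "t in s[i:j+1]"
lemma pv_inner_count (tl sl : List Char) (i : Int) (a b B : Int) (hab : a ≤ b)
    (h : ∀ j, a ≤ j → j < b →
      PySem.Chars.isIn tl (PySem.List.slice sl (some i) (some (j + 1))) = decide (B ≤ j)) :
    pvInnerA tl sl i (PySem.List.pyRange a b 1) = min b (max a B) - a := by
  obtain ⟨d, hd⟩ : ∃ d : Nat, b - a = d := ⟨(b - a).toNat, (Int.toNat_of_nonneg (by omega)).symm⟩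
  induction d generalizing a with
  | zero =>
    rw [PySem.List.pyRange_one_eq_nil (by omega)]
    show (0 : Int) = _
    have h1 : min b (max a B) = b := by omega
    omega
  | succ d ih =>
    have hab' : a < b := by omega
    rw [PySem.List.pyRange_one_cons hab']
    rw [show pvInnerA tl sl i (a :: PySem.List.pyRange (a + 1) b 1) =
        (if PySem.Chars.isIn tl (PySem.List.slice sl (some i) (some (a + 1))) then 0
         else 1 + pvInnerA tl sl i (PySem.List.pyRange (a + 1) b 1)) from rfl]
    rw [h a (le_refl a) hab']
    by_cases hB : B ≤ a
    · rw [if_pos (by simpa using hB)]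
      have h1 : min b (max a B) = a := by omega
      omega
    · rw [if_neg (by simpa using hB)]
      rw [ih (a + 1) (by omega) (fun j hj1 hj2 => h j (by omega) hj2) (by omega)]
      omega

-- per start i, A's inner loop equals pvG
lemma pv_innerA_eq_g (sl tl : List Char) (ht : tl ≠ []) (i : Nat) (hi : i < sl.length) :
    pvInnerA tl sl (i : Int) (PySem.List.pyRange (i : Int) (sl.length : Int) 1) = pvG sl tl i := by
  have hm : 0 < tl.length := List.length_pos_of_ne_nil ht
  rcases hn : pvNext sl tl i with _ | p
  · have hnone := pvNextAux_none hn
    have hg : pvG sl tl i = (sl.length : Int) - i := by simp [pvG, hn]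
    rw [hg, pv_inner_count tl sl (i : Int) (i : Int) (sl.length : Int) (sl.length : Int)
      (by omega) ?_]
    · omega
    · intro j hj1 hj2
      lift j to ℕ using (by omega) with jn
      rw [decide_eq_false (by omega)]
      rw [← Bool.not_eq_true]
      intro htrue
      obtain ⟨p, hp1, hp2, hp3⟩ := (pv_isIn_slice_iff sl tl ht i jn).mp htrue
      exact hnone p hp1 (by omega) hp3
  · obtain ⟨hip, hpd, hpre, hmin⟩ := pvNextAux_some hn
    have hlen : tl.length ≤ sl.length - p := by
      have := hpre.length_le
      simpa using this
    have hg : pvG sl tl i = (p : Int) + tl.length - 1 - i := by simp [pvG, hn]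
    rw [hg, pv_inner_count tl sl (i : Int) (i : Int) (sl.length : Int)
      ((p : Int) + tl.length - 1) (by omega) ?_]
    · omega
    · intro j hj1 hj2
      lift j to ℕ using (by omega) with jn
      by_cases hP : (p : Int) + tl.length - 1 ≤ (jn : Int)
      · rw [decide_eq_true hP]
        exact (pv_isIn_slice_iff sl tl ht i jn).mpr ⟨p, hip, by omega, hpre⟩
      · rw [decide_eq_false hP, ← Bool.not_eq_true]
        intro htrue
        obtain ⟨p', hp1, hp2, hp3⟩ := (pv_isIn_slice_iff sl tl ht i jn).mp htrue
        have hpp : p ≤ p' := by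
          by_contra hc
          exact hmin p' hp1 (by omega) hp3
        omega

-- B's window test is the occurrence predicate
lemma pv_slice_eq_iff_prefix (sl tl : List Char) (k : Nat) :
    (PySem.List.slice sl (some (k : Int)) (some ((k : Int) + (tl.length : Int))) = tl) ↔
      tl <+: sl.drop k := by
  rw [PySem.List.slice_natCast_add]
  constructor
  · intro h; rw [← h]; exact List.take_prefix _ _
  · intro h; exact (List.prefix_iff_eq_take.mp h).symm

-- B's right-to-left loop: invariant nxt = pvNext, value = sum of pvG over processed starts
lemma pv_loopB_eq (sl tl : List Char) (k : Nat) (hk : k ≤ sl.length) :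
    pvLoopB sl tl (tl.length : Int) (sl.length : Int)
        (PySem.List.pyRange ((k : Int) - 1) (-1) (-1))
        (Option.map (fun p : Nat => (p : Int)) (pvNext sl tl k))
      = ((List.range k).map (pvG sl tl)).sum := by
  induction k with
  | zero =>
    rw [show ((0 : Nat) : Int) - 1 = (-1 : Int) from rfl]
    rw [PySem.List.pyRange_neg_one_eq_nil (le_refl _)]
    simp [pvLoopB]
  | succ k ih =>
    have hkk : k ≤ sl.length := by omega
    have ihk := ih hkk
    have hcast : ((k + 1 : Nat) : Int) - 1 = (k : Int) := by push_cast; ring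
    rw [hcast, PySem.List.pyRange_neg_one_cons (by omega)]
    have hstep : pvNext sl tl k = if tl <+: sl.drop k then some k else pvNext sl tl (k + 1) := by
      unfold pvNext
      rw [show sl.length - k = (sl.length - (k + 1)) + 1 from by omega, pvNextAux]
    simp only [pvLoopB]
    rw [List.range_succ, List.map_append, List.sum_append]
    by_cases hocc : tl <+: sl.drop k
    · rw [if_pos ((pv_slice_eq_iff_prefix sl tl k).mpr hocc)]
      have hnk : pvNext sl tl k = some k := by rw [hstep, if_pos hocc]
      rw [hnk, Option.map_some] at ihk
      rw [ihk]
      have hg : pvG sl tl k = (k : Int) + tl.length - 1 - k := by simp [pvG, hnk]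
      simp only [List.map_cons, List.map_nil, List.sum_cons, List.sum_nil, hg]
      omega
    · rw [if_neg (fun hc => hocc ((pv_slice_eq_iff_prefix sl tl k).mp hc))]
      have hnk : pvNext sl tl k = pvNext sl tl (k + 1) := by rw [hstep, if_neg hocc]
      rw [← hnk, ihk]
      have hg : pvG sl tl k = match pvNext sl tl k with
          | some p => (p : Int) + tl.length - 1 - (k : Int)
          | none => (sl.length : Int) - k := by simp [pvG]
      rcases hx : pvNext sl tl k with _ | p <;>
        rw [hx] at hg <;>
        simp only [Option.map_some, Option.map_none, List.map_cons, List.map_nil,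
          List.sum_cons, List.sum_nil, add_zero] at hg ⊢ <;>
        rw [hg] <;> ring

-- A as a sum over starts
lemma pv_A_eq_sum (s t : String) :
    count_good_substring s t =
      ((List.range s.toList.length).map
        (fun i : Nat => pvInnerA t.toList s.toList (i : Int)
          (PySem.List.pyRange (i : Int) (s.toList.length : Int) 1))).sum := by
  simp only [count_good_substring]
  rw [PySem.List.pyRange_zero_natCast, PySem.List.foldl_add, List.map_map]
  rw [zero_add]
  exact congrArg List.sum (List.map_congr_left (fun k _ => rfl))

-- ===== VERDICT (by name: the statement is the Claim_ definition above) =====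
theorem count_good_substring_spec : Claim_equal_count_good_substring := by
  intro s t _
  unfold Spec_count_good_substring count_good_substring_alt
  rw [pv_A_eq_sum]
  by_cases ht : t.toList = []
  · rw [ht]
    simp only [List.length_nil, Nat.cast_zero, reduceIte]
    apply List.sum_eq_zero
    intro x hx
    obtain ⟨i, hi, rfl⟩ := List.mem_map.mp hx
    have hin : (i : Int) < (s.toList.length : Int) := by
      have := List.mem_range.mp hi; omega
    rw [PySem.List.pyRange_one_cons hin]
    rw [show pvInnerA [] s.toList (i : Int) ((i : Int) :: PySem.List.pyRange ((i : Int) + 1) (s.toList.length : Int) 1) =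
        (if PySem.Chars.isIn [] (PySem.List.slice s.toList (some (i : Int)) (some ((i : Int) + 1)))
          then 0 else 1 + pvInnerA [] s.toList (i : Int)
            (PySem.List.pyRange ((i : Int) + 1) (s.toList.length : Int) 1)) from rfl]
    rw [PySem.Chars.isIn_nil]
    simp
  · have hm : (t.toList.length : Int) ≠ 0 := by
      have : 0 < t.toList.length := List.length_pos_of_ne_nil ht
      omega
    simp only []
    rw [if_neg hm]
    have hinit : (none : Option Int) = Option.map (fun p : Nat => (p : Int)) (pvNext s.toList t.toList s.toList.length) := by
      unfold pvNext
      rw [show s.toList.length - s.toList.length = 0 from by omega]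
      rfl
    rw [hinit, pv_loopB_eq s.toList t.toList s.toList.length (le_refl _)]
    apply congrArg List.sum
    apply List.map_congr_left
    intro i hi
    exact pv_innerA_eq_g s.toList t.toList ht i (List.mem_range.mp hi)
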